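-- pv_equiv track=rewrite | github.com/skvcool-rgb/KOS-Organism | kos/grid_primitives.py | gravity_up
-- ===== SOURCE A (Python) =====
-- from typing import Any, Callable, Dict, List, Tuple
--
-- Grid = List[List[int]]
--
-- def grid_copy(g: Grid) -> Grid:
--     return [row[:] for row in g]
--
-- def gravity_up(g: Grid) -> Grid:
--     if not g or not g[0]: return g
--     out = grid_copy(g)
--     r, c = len(out), len(out[0])
--     for col in range(c):
--         vals = [out[row][col] for row in range(r) if out[row][col] != 0]
--         for row in range(r):
--             out[row][col] = 0
--         for i, v in enumerate(vals):
--             out[i][col] = v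
--     return out
-- ===== SOURCE B (Python) =====
-- from typing import List
--
-- Grid = List[List[int]]
--
-- def gravity_up(g: Grid) -> Grid:
--     if not g or not g[0]:
--         return g
--     out = [row[:] for row in g]
--     r, c = len(out), len(out[0])
--     for col in range(c):
--         w = 0
--         for row in range(r):
--             v = out[row][col]
--             if v != 0:
--                 out[w][col] = v
--                 w += 1
--         for row in range(w, r):
--             out[row][col] = 0
--     return out
-- ===== Notes on version B (the rewrite author's own statement) =====
-- stated objective: alternative
-- what changed: Replaces A's three sequential passes per column (gather nonzeros into an auxiliary list, zero the entire column, rewrite the prefix by enumerate) with an in-place two-pointer stable compaction: one forward scan per column copies each nonzero cell to a write index w and increments it, then only the tail rows w..r-1 are zeroed, with no auxiliary value list.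
import Mathlib
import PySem

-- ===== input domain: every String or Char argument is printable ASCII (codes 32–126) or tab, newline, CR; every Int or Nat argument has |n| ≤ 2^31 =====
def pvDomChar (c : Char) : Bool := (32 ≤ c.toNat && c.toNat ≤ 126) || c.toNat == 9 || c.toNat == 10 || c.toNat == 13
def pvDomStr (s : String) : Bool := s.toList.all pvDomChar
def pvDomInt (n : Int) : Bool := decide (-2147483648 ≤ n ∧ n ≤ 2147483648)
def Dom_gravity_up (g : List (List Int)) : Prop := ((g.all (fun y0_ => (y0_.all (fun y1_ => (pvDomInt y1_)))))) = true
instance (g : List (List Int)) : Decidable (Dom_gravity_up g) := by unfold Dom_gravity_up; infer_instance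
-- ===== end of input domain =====

-- B compacts each column in place with a single forward scan and a write pointer w
-- (then zeroes only the tail rows w..r-1), instead of A's three sequential passes per
-- column (gather into an auxiliary list, zero the whole column, rewrite by enumerate).


-- ===== PORT A =====
def grid_copy (g : List (List Int)) : List (List Int) :=
  g.map (fun row => PySem.List.slice row none none)   -- row[:]

def gravity_up (g : List (List Int)) : List (List Int) :=
  if g = [] ∨ g.headI = [] then g
  else
    let out0 := grid_copy g
    let r : Int := (out0.length : Int)
    let c : Int := ((PySem.List.pyGetD out0 0 []).length : Int)
    -- indices produced by range(...) and the write pointer are in range under Pre_,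
    -- so the total forms pyGetD / pySetD are exact here
    (PySem.List.pyRange 0 c 1).foldl (fun out col =>
      let vals : List Int := (PySem.List.pyRange 0 r 1).foldl
        (fun vs row =>
          if PySem.List.pyGetD (PySem.List.pyGetD out row ([] : List Int)) col 0 ≠ 0 then
            vs ++ [PySem.List.pyGetD (PySem.List.pyGetD out row ([] : List Int)) col 0]
          else vs) []
      let out2 := (PySem.List.pyRange 0 r 1).foldl
        (fun o row =>
          PySem.List.pySetD o row (PySem.List.pySetD (PySem.List.pyGetD o row ([] : List Int)) col 0)) out
      (PySem.List.enumerate vals).foldl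
        (fun o iv =>
          PySem.List.pySetD o iv.1 (PySem.List.pySetD (PySem.List.pyGetD o iv.1 ([] : List Int)) col iv.2)) out2
      ) out0

-- ===== PORT B =====
def gravity_up_alt (g : List (List Int)) : List (List Int) :=
  if g = [] ∨ g.headI = [] then g
  else
    let out0 := g.map (fun row => PySem.List.slice row none none)   -- [row[:] for row in g]
    let r : Int := (out0.length : Int)
    let c : Int := ((PySem.List.pyGetD out0 0 []).length : Int)
    (PySem.List.pyRange 0 c 1).foldl (fun out col =>
      -- single forward scan: state (out, w); each nonzero cell is copied to row w
      let st := (PySem.List.pyRange 0 r 1).foldl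
        (fun (st : List (List Int) × Int) row =>
          if PySem.List.pyGetD (PySem.List.pyGetD st.1 row ([] : List Int)) col 0 ≠ 0 then
            (PySem.List.pySetD st.1 st.2
              (PySem.List.pySetD (PySem.List.pyGetD st.1 st.2 ([] : List Int)) col
                (PySem.List.pyGetD (PySem.List.pyGetD st.1 row ([] : List Int)) col 0)),
             st.2 + 1)
          else st) (out, (0 : Int))
      -- zero only the tail rows w..r-1
      (PySem.List.pyRange st.2 r 1).foldl
        (fun o row =>
          PySem.List.pySetD o row (PySem.List.pySetD (PySem.List.pyGetD o row ([] : List Int)) col 0)) st.1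
      ) out0

-- ===== PRECONDITION & SPEC =====
-- Pre_ excludes exactly the ragged grids in which some row is shorter than the first
-- row: there A raises IndexError reading out[row][col] (and B raises there too).
def Pre_gravity_up (g : List (List Int)) : Prop :=
  g = [] ∨ g.headI = [] ∨ ∀ row ∈ g, g.headI.length ≤ row.length
instance (g : List (List Int)) : Decidable (Pre_gravity_up g) := by
  unfold Pre_gravity_up; infer_instance

def pvWitness_gravity_up : List (List Int) := [[1, 0], [0, 2], [3, 4]]

def Spec_gravity_up (g : List (List Int)) (out : List (List Int)) : Prop := out = gravity_up_alt g
instance (g : List (List Int)) (out : List (List Int)) : Decidable (Spec_gravity_up g out) := by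
  unfold Spec_gravity_up; infer_instance

-- ===== CLAIM (what is proved, stated in full; the proofs are below) =====
def Claim_equal_gravity_up : Prop :=
  ∀ (g : List (List Int)), Dom_gravity_up g → Pre_gravity_up g → Spec_gravity_up g (gravity_up g)

-- ===== LEMMAS AND PROOFS =====

-- proof-side abbreviations
def pvCell (s : List (List Int)) (i j : Nat) : Int := (s.getD i []).getD j 0
def pvColOf (g : List (List Int)) (j : Nat) : List Int := g.map (fun row => row.getD j 0)
def pvNewcol (g : List (List Int)) (j : Nat) : List Int :=
  let nz := (pvColOf g j).filter (fun v => v ≠ 0)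
  nz ++ List.replicate (g.length - nz.length) 0
-- the single in-place write out[t][k] = v
def pvWr (o : List (List Int)) (t k : Nat) (v : Int) : List (List Int) :=
  o.set t ((o.getD t []).set k v)
-- the body of A's outer column loop, as a named function (lets of the port zeta-reduce to this)
def pvBody (r : Int) (out : List (List Int)) (col : Int) : List (List Int) :=
  (PySem.List.enumerate
      ((PySem.List.pyRange 0 r 1).foldl
        (fun vs row =>
          if PySem.List.pyGetD (PySem.List.pyGetD out row ([] : List Int)) col 0 ≠ 0 then
            vs ++ [PySem.List.pyGetD (PySem.List.pyGetD out row ([] : List Int)) col 0]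
          else vs) [])).foldl
    (fun o iv =>
      PySem.List.pySetD o iv.1 (PySem.List.pySetD (PySem.List.pyGetD o iv.1 ([] : List Int)) col iv.2))
    ((PySem.List.pyRange 0 r 1).foldl
      (fun o row =>
        PySem.List.pySetD o row (PySem.List.pySetD (PySem.List.pyGetD o row ([] : List Int)) col 0)) out)
-- the body of B's outer column loop
def pvBodyAlt (r : Int) (out : List (List Int)) (col : Int) : List (List Int) :=
  let st := (PySem.List.pyRange 0 r 1).foldl
    (fun (st : List (List Int) × Int) row =>
      if PySem.List.pyGetD (PySem.List.pyGetD st.1 row ([] : List Int)) col 0 ≠ 0 then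
        (PySem.List.pySetD st.1 st.2
          (PySem.List.pySetD (PySem.List.pyGetD st.1 st.2 ([] : List Int)) col
            (PySem.List.pyGetD (PySem.List.pyGetD st.1 row ([] : List Int)) col 0)),
         st.2 + 1)
      else st) (out, (0 : Int))
  (PySem.List.pyRange st.2 r 1).foldl
    (fun o row =>
      PySem.List.pySetD o row (PySem.List.pySetD (PySem.List.pyGetD o row ([] : List Int)) col 0)) st.1
-- B's inner scan step, at Nat row index t and Nat column k
def pvStepAlt (k : Nat) (st : List (List Int) × Int) (t : Nat) : List (List Int) × Int :=
  if PySem.List.pyGetD (PySem.List.pyGetD st.1 ((t : Nat) : Int) ([] : List Int)) ((k : Nat) : Int) 0 ≠ 0 then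
    (PySem.List.pySetD st.1 st.2
      (PySem.List.pySetD (PySem.List.pyGetD st.1 st.2 ([] : List Int)) ((k : Nat) : Int)
        (PySem.List.pyGetD (PySem.List.pyGetD st.1 ((t : Nat) : Int) ([] : List Int)) ((k : Nat) : Int) 0)),
     st.2 + 1)
  else st

lemma pvWr_length (o : List (List Int)) (t k : Nat) (v : Int) :
    (pvWr o t k v).length = o.length := by
  simp [pvWr]

lemma pvWr_rowlen (o : List (List Int)) (t k : Nat) (v : Int) (i : Nat) :
    ((pvWr o t k v).getD i []).length = (o.getD i []).length := by
  simp only [pvWr, List.getD, List.getElem?_set]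
  split_ifs with h1 h2
  · subst h1; simp [List.getElem?_eq_getElem h2]
  · subst h1
    simp [List.getElem?_eq_none_iff.mpr (Nat.le_of_not_lt h2)]
  · rfl

-- the loop invariant: after the first k columns, shapes are those of g, every cell
-- in a processed column holds the compacted value, every other cell its g value
def pvInv (g s : List (List Int)) (k : Nat) : Prop :=
  s.length = g.length ∧
  (∀ i, (s.getD i []).length = (g.getD i []).length) ∧
  (∀ i j, i < g.length →
     pvCell s i j = if j < k then (pvNewcol g j).getD i 0 else pvCell g i j)

lemma pv_getD_set {α : Type} (l : List α) (k : Nat) (v d : α) (j : Nat) :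
    (l.set k v).getD j d = if j = k ∧ k < l.length then v else l.getD j d := by
  rw [List.getD_eq_getElem?_getD, List.getElem?_set]
  by_cases h1 : k = j
  · subst h1
    by_cases h2 : k < l.length
    · simp [h2]
    · simp [h2, List.getD_eq_getElem?_getD]
  · rw [if_neg h1, if_neg (by rintro ⟨h, -⟩; exact h1 h.symm), List.getD_eq_getElem?_getD]

lemma pvCell_pvWr (o : List (List Int)) (t k : Nat) (v : Int) (i j : Nat) :
    pvCell (pvWr o t k v) i j =
      if i = t ∧ j = k ∧ t < o.length ∧ k < (o.getD t []).length then v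
      else pvCell o i j := by
  unfold pvCell pvWr
  rw [pv_getD_set o t _ [] i]
  by_cases h : i = t ∧ t < o.length
  · rw [if_pos h, pv_getD_set]
    obtain ⟨h1, h2⟩ := h
    by_cases hk : j = k ∧ k < (o.getD t []).length
    · rw [if_pos hk, if_pos ⟨h1, hk.1, h2, hk.2⟩]
    · rw [if_neg hk, if_neg (by rintro ⟨a, b, c, d⟩; exact hk ⟨b, d⟩)]
      rw [h1]
  · rw [if_neg h, if_neg (by rintro ⟨a, b, c, d⟩; exact h ⟨a, c⟩)]

-- cells of a left fold of writes at rows 0..m-1, all in column k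
lemma pv_foldl_wr (k : Nat) (f : Nat → Int) :
    ∀ (m : Nat) (s : List (List Int)), m ≤ s.length →
      (((List.range m).foldl (fun o t => pvWr o t k (f t)) s).length = s.length ∧
       (∀ i, ((((List.range m).foldl (fun o t => pvWr o t k (f t)) s).getD i []).length
            = (s.getD i []).length)) ∧
       (∀ i j, pvCell ((List.range m).foldl (fun o t => pvWr o t k (f t)) s) i j
            = if i < m ∧ j = k ∧ k < (s.getD i []).length then f i else pvCell s i j)) := by
  intro m
  induction m with
  | zero => intro s _; refine ⟨rfl, fun i => rfl, fun i j => by simp⟩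
  | succ m ih =>
    intro s hm
    have hm' : m ≤ s.length := Nat.le_of_succ_le hm
    obtain ⟨hlen, hrow, hcell⟩ := ih s hm'
    rw [List.range_succ, List.foldl_append, List.foldl_cons, List.foldl_nil]
    set z := (List.range m).foldl (fun o t => pvWr o t k (f t)) s with hz
    refine ⟨by rw [pvWr_length, hlen], fun i => by rw [pvWr_rowlen, hrow], fun i j => ?_⟩
    rw [pvCell_pvWr, hcell]
    have hmz : m < z.length := by omega
    rw [hrow m]
    by_cases him : i = m
    · rw [him]
      by_cases hjk : j = k
      · by_cases hk : k < (s.getD m []).length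
        · simp [hjk, hmz, hk]
        · simp [hjk, hmz, hk]
      · simp [hjk]
    · have hne : ¬ (i = m ∧ j = k ∧ m < z.length ∧ k < (s.getD m []).length) := by tauto
      rw [if_neg hne]
      by_cases hi : i < m
      · have h1 : (i < m ∧ j = k ∧ k < (s.getD i []).length) ↔
            (i < m + 1 ∧ j = k ∧ k < (s.getD i []).length) := by
          constructor <;> rintro ⟨a, b, c⟩ <;> exact ⟨by omega, b, c⟩
        rw [if_congr h1 rfl rfl]
      · have h2 : ¬ (i < m ∧ j = k ∧ k < (s.getD i []).length) := by tauto
        have h3 : ¬ (i < m + 1 ∧ j = k ∧ k < (s.getD i []).length) := by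
          rintro ⟨a, b, c⟩; exact him (by omega)
        rw [if_neg h2, if_neg h3]

-- cells of a left fold of writes at rows a..a+m-1, all in column k
lemma pv_foldl_wr_off (k a : Nat) (f : Nat → Int) :
    ∀ (m : Nat) (s : List (List Int)), a + m ≤ s.length →
      (((List.range m).foldl (fun o t => pvWr o (a + t) k (f (a + t))) s).length = s.length ∧
       (∀ i, ((((List.range m).foldl (fun o t => pvWr o (a + t) k (f (a + t))) s).getD i []).length
            = (s.getD i []).length)) ∧
       (∀ i j, pvCell ((List.range m).foldl (fun o t => pvWr o (a + t) k (f (a + t))) s) i j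
            = if a ≤ i ∧ i < a + m ∧ j = k ∧ k < (s.getD i []).length then f i
              else pvCell s i j)) := by
  intro m
  induction m with
  | zero =>
    intro s _
    refine ⟨rfl, fun i => rfl, fun i j => by
      rw [List.range_zero, List.foldl_nil, if_neg (by rintro ⟨h1, h2, -⟩; omega)]⟩
  | succ m ih =>
    intro s hm
    have hm' : a + m ≤ s.length := by omega
    obtain ⟨hlen, hrow, hcell⟩ := ih s hm'
    rw [List.range_succ, List.foldl_append, List.foldl_cons, List.foldl_nil]
    set z := (List.range m).foldl (fun o t => pvWr o (a + t) k (f (a + t))) s with hz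
    refine ⟨by rw [pvWr_length, hlen], fun i => by rw [pvWr_rowlen, hrow], fun i j => ?_⟩
    rw [pvCell_pvWr, hcell, show a + (m + 1) = a + m + 1 by omega]
    have hmz : a + m < z.length := by omega
    rw [hrow (a + m)]
    by_cases him : i = a + m
    · rw [him]
      by_cases hjk : j = k
      · by_cases hk : k < (s.getD (a + m) []).length
        · simp [hjk, hmz, hk]
        · simp [hjk, hmz, hk]
      · simp [hjk]
    · have hne : ¬ (i = a + m ∧ j = k ∧ a + m < z.length ∧ k < (s.getD (a + m) []).length) := by
        tauto
      rw [if_neg hne]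
      by_cases hi : a ≤ i ∧ i < a + m
      · have h1 : (a ≤ i ∧ i < a + m ∧ j = k ∧ k < (s.getD i []).length) ↔
            (a ≤ i ∧ i < a + m + 1 ∧ j = k ∧ k < (s.getD i []).length) := by
          constructor <;> rintro ⟨a1, a2, a3, a4⟩ <;> exact ⟨a1, by omega, a3, a4⟩
        rw [if_congr h1 rfl rfl]
      · have h2 : ¬ (a ≤ i ∧ i < a + m ∧ j = k ∧ k < (s.getD i []).length) := by tauto
        have h3 : ¬ (a ≤ i ∧ i < a + m + 1 ∧ j = k ∧ k < (s.getD i []).length) := by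
          rintro ⟨a1, a2, a3, a4⟩; exact (by tauto : ¬ (a ≤ i ∧ i < a + m)) ⟨a1, by omega⟩
        rw [if_neg h2, if_neg h3]

lemma pv_getD_of_lt (g : List (List Int)) (i : Nat) (hi : i < g.length) :
    g.getD i [] = g[i] := by
  rw [List.getD_eq_getElem?_getD, List.getElem?_eq_getElem hi, Option.getD_some]

lemma pv_cell_getElem (s : List (List Int)) (i j : Nat) (hi : i < s.length)
    (hj : j < s[i].length) : pvCell s i j = s[i][j] := by
  unfold pvCell
  rw [pv_getD_of_lt s i hi, List.getD_eq_getElem?_getD, List.getElem?_eq_getElem hj,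
    Option.getD_some]

lemma pv_range_cast (n : Nat) :
    PySem.List.pyRange 0 (n : Int) 1 = List.map (fun (t : Nat) => (t : Int)) (List.range n) := by
  rw [PySem.List.pyRange_one]
  simp only [sub_zero, Int.toNat_natCast, zero_add]

-- the comprehension's fold collects the nonzero entries of column k
lemma pv_vals_eq (s : List (List Int)) (k : Nat) (a : List Int) :
    (List.range s.length).foldl
      (fun vs t => if (s.getD t []).getD k 0 ≠ 0 then vs ++ [(s.getD t []).getD k 0] else vs) a
    = a ++ (s.map (fun rw => rw.getD k 0)).filter (fun v => v ≠ 0) := by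
  induction s generalizing a with
  | nil => simp
  | cons rw rest ih =>
    rw [List.length_cons, List.range_succ_eq_map, List.foldl_cons, List.foldl_map]
    simp only [List.getD_cons_zero, List.getD_cons_succ]
    rw [ih]
    rcases eq_or_ne (rw.getD k 0) 0 with h | h
    · have h2 : rw[k]?.getD 0 = 0 := by rwa [List.getD_eq_getElem?_getD] at h
      simp [h2]
    · have h2 : ¬ rw[k]?.getD 0 = 0 := by rwa [List.getD_eq_getElem?_getD] at h
      simp [h2, List.append_assoc]

-- the enumerate fold is a fold of single writes at rows 0..len(vals)-1
lemma pv_enum_fold (k : Nat) (vals : List Int) : ∀ (z : List (List Int)),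
    (PySem.List.enumerate vals 0).foldl
      (fun o iv =>
        PySem.List.pySetD o iv.1 ((PySem.List.pyGetD o iv.1 ([] : List Int)).set k iv.2)) z
    = (List.range vals.length).foldl (fun o t => pvWr o t k (vals.getD t 0)) z := by
  induction vals using List.reverseRecOn with
  | nil => intro z; simp [PySem.List.enumerate_nil]
  | append_singleton vs v ih =>
    intro z
    rw [PySem.List.enumerate_append, List.foldl_append, ih,
      List.length_append, List.length_singleton, List.range_succ, List.foldl_append]
    have hfold : (List.range vs.length).foldl (fun o t => pvWr o t k (vs.getD t 0)) z
        = (List.range vs.length).foldl (fun o t => pvWr o t k ((vs ++ [v]).getD t 0)) z := by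
      apply List.foldl_ext
      intro o t ht
      have ht' : t < vs.length := List.mem_range.mp ht
      rw [List.getD_eq_getElem?_getD, List.getD_eq_getElem?_getD,
        List.getElem?_append_left ht']
    rw [hfold]
    have hv : (vs ++ [v]).getD vs.length 0 = v := by
      rw [List.getD_eq_getElem?_getD, List.getElem?_concat_length, Option.getD_some]
    simp [PySem.List.enumerate_cons, PySem.List.enumerate_nil, pvWr]

lemma pv_getD_pad (nz : List Int) (n i : Nat) :
    (nz ++ List.replicate n 0).getD i 0 = if i < nz.length then nz.getD i 0 else 0 := by
  by_cases h : i < nz.length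
  · rw [if_pos h]
    simp [List.getD_eq_getElem?_getD, List.getElem?_append_left h]
  · rw [if_neg h]
    rcases Nat.lt_or_ge i (nz.length + n) with h2 | h2
    · have h3 : i - nz.length < n := by omega
      simp [List.getD_eq_getElem?_getD, List.getElem?_append_right (Nat.le_of_not_lt h), h3]
    · have h3 : (nz ++ List.replicate n 0)[i]? = none := by
        apply List.getElem?_eq_none_iff.mpr; simp; omega
      simp [List.getD_eq_getElem?_getD, h3]

lemma pv_colmap (g s : List (List Int)) (k : Nat) (h1 : s.length = g.length)
    (hcol : ∀ i, i < g.length → pvCell s i k = pvCell g i k) :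
    s.map (fun rw => rw.getD k 0) = pvColOf g k := by
  apply List.ext_getElem
  · simp [pvColOf, h1]
  · intro i hi hi2
    simp only [pvColOf, List.getElem_map]
    have his : i < s.length := by simpa using hi
    have hig : i < g.length := by simpa [pvColOf] using hi2
    have := hcol i hig
    simpa [pvCell, List.getD, List.getElem?_eq_getElem his,
      List.getElem?_eq_getElem hig] using this

lemma pv_headI_getD (g : List (List Int)) (hg : g ≠ []) : g.getD 0 [] = g.headI := by
  cases g with
  | nil => exact absurd rfl hg
  | cons a t => rfl

-- two grids satisfying the invariant at the same stage are equal
lemma pv_eq_of_inv (g s t : List (List Int)) (k : Nat)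
    (hs : pvInv g s k) (ht : pvInv g t k) : s = t := by
  obtain ⟨hsl, hsr, hsc⟩ := hs
  obtain ⟨htl, htr, htc⟩ := ht
  apply List.ext_getElem (by rw [hsl, htl])
  intro i hi1 hi2
  have hig : i < g.length := by rwa [hsl] at hi1
  apply List.ext_getElem
  · have := (hsr i).trans (htr i).symm
    rw [pv_getD_of_lt s i hi1, pv_getD_of_lt t i hi2] at this
    exact this
  · intro j hj1 hj2
    rw [← pv_cell_getElem s i j hi1 hj1, ← pv_cell_getElem t i j hi2 hj2,
      hsc i j hig, htc i j hig]

-- A's main-case computation, as the column fold of pvBody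
lemma pv_gravity_eq (g : List (List Int)) (hg : g ≠ []) (hc : g.headI ≠ []) :
    gravity_up g
      = (PySem.List.pyRange 0 (g.headI.length : Int) 1).foldl (pvBody (g.length : Int)) g := by
  have hcopy : grid_copy g = g := by
    simp [grid_copy, PySem.List.slice_none_none]
  simp only [gravity_up]
  rw [if_neg (by rintro (h | h) <;> [exact hg h; exact hc h])]
  rw [hcopy, PySem.List.pyGetD_zero, pv_headI_getD g hg]
  rfl

-- B's main-case computation, as the column fold of pvBodyAlt
lemma pv_alt_eq (g : List (List Int)) (hg : g ≠ []) (hc : g.headI ≠ []) :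
    gravity_up_alt g
      = (PySem.List.pyRange 0 (g.headI.length : Int) 1).foldl (pvBodyAlt (g.length : Int)) g := by
  have hcopy : g.map (fun row => PySem.List.slice row none none) = g := by
    simp [PySem.List.slice_none_none]
  simp only [gravity_up_alt]
  rw [if_neg (by rintro (h | h) <;> [exact hg h; exact hc h])]
  rw [hcopy, PySem.List.pyGetD_zero, pv_headI_getD g hg]
  rfl

-- A: one column step preserves and extends the invariant
lemma pvBody_inv (g s : List (List Int)) (k : Nat)
    (hge : ∀ row ∈ g, g.headI.length ≤ row.length)
    (hk : k < g.headI.length) (hInv : pvInv g s k) :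
    pvInv g (pvBody (g.length : Int) s (k : Int)) (k + 1) := by
  obtain ⟨hlen, hrow, hcell⟩ := hInv
  have hrowK : ∀ i, i < g.length → k < (s.getD i []).length := by
    intro i hi
    rw [hrow i, pv_getD_of_lt g i hi]
    exact lt_of_lt_of_le hk (hge _ (List.getElem_mem hi))
  unfold pvBody
  simp only [pv_range_cast, List.foldl_map, PySem.List.pyGetD_natCast,
    PySem.List.pySetD_natCast]
  -- the gathered values are the nonzero entries of column k of g
  have hvals : (List.range g.length).foldl
      (fun vs t => if (s.getD t []).getD k 0 ≠ 0 then vs ++ [(s.getD t []).getD k 0] else vs) []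
      = (pvColOf g k).filter (fun v => v ≠ 0) := by
    rw [← hlen, pv_vals_eq, List.nil_append,
      pv_colmap g s k hlen (fun i hi => by
        have := hcell i k hi
        rwa [if_neg (lt_irrefl k)] at this)]
  rw [hvals]
  set nz : List Int := (pvColOf g k).filter (fun v => v ≠ 0) with hnz
  have hnzlen : nz.length ≤ g.length := by
    calc nz.length ≤ (pvColOf g k).length := List.length_filter_le _ _
      _ = g.length := by simp [pvColOf]
  -- the zeroing fold
  have hzfun : (fun (o : List (List Int)) (t : Nat) => o.set t ((o.getD t []).set k 0))
      = fun o t => pvWr o t k 0 := rfl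
  rw [hzfun]
  obtain ⟨hzlen, hzrow, hzcell⟩ :=
    pv_foldl_wr k (fun _ => 0) g.length s (le_of_eq hlen.symm)
  set z := (List.range g.length).foldl (fun o t => pvWr o t k 0) s with hzdef
  -- the writing fold
  rw [pv_enum_fold]
  obtain ⟨hwlen, hwrow, hwcell⟩ :=
    pv_foldl_wr k (fun t => nz.getD t 0) nz.length z (by omega)
  refine ⟨by rw [hwlen, hzlen, hlen], fun i => by rw [hwrow, hzrow, hrow], ?_⟩
  intro i j hi
  rw [hwcell, hzcell]
  have hz1 : k < (z.getD i []).length := by rw [hzrow]; exact hrowK i hi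
  have hs1 : k < (s.getD i []).length := hrowK i hi
  by_cases hjk : j = k
  · by_cases hiL : i < nz.length
    · rw [if_pos ⟨hiL, hjk, hz1⟩, if_pos (by omega : j < k + 1), hjk]
      simp only [pvNewcol]
      rw [pv_getD_pad, ← hnz, if_pos hiL]
    · rw [if_neg (by rintro ⟨a, -⟩; exact hiL a), if_pos ⟨hi, hjk, hs1⟩,
        if_pos (by omega : j < k + 1), hjk]
      simp only [pvNewcol]
      rw [pv_getD_pad, ← hnz, if_neg hiL]
  · rw [if_neg (by rintro ⟨-, a, -⟩; exact hjk a),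
      if_neg (by rintro ⟨-, a, -⟩; exact hjk a)]
    rw [hcell i j hi]
    by_cases hjk2 : j < k
    · rw [if_pos hjk2, if_pos (by omega)]
    · rw [if_neg hjk2, if_neg (by omega)]

-- B: the single forward scan equals the fold of writes of the filtered column prefix
lemma pv_compact (s : List (List Int)) (k : Nat) :
    ∀ m, m ≤ s.length →
      (List.range m).foldl (pvStepAlt k) (s, (0 : Int))
        = ((List.range (((pvColOf s k).take m).filter (fun v => v ≠ 0)).length).foldl
             (fun o t => pvWr o t k ((((pvColOf s k).take m).filter (fun v => v ≠ 0)).getD t 0)) s,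
           ((((pvColOf s k).take m).filter (fun v => v ≠ 0)).length : Int)) := by
  intro m
  induction m with
  | zero => intro _; simp
  | succ m ih =>
    intro hm
    have hm' : m ≤ s.length := Nat.le_of_succ_le hm
    have hmlt : m < s.length := hm
    rw [List.range_succ, List.foldl_append, List.foldl_cons, List.foldl_nil, ih hm']
    set nzm := ((pvColOf s k).take m).filter (fun v => v ≠ 0) with hnzm
    have hnlen : nzm.length ≤ m := by
      calc nzm.length ≤ ((pvColOf s k).take m).length := List.length_filter_le _ _
        _ ≤ m := by simp [pvColOf]
    obtain ⟨hWlen, hWrow, hWcell⟩ :=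
      pv_foldl_wr k (fun t => nzm.getD t 0) nzm.length s (le_trans hnlen hm')
    set W := (List.range nzm.length).foldl (fun o t => pvWr o t k (nzm.getD t 0)) s with hW
    have hvread : PySem.List.pyGetD (PySem.List.pyGetD W ((m : Nat) : Int) ([] : List Int))
        ((k : Nat) : Int) 0 = pvCell s m k := by
      rw [PySem.List.pyGetD_natCast, PySem.List.pyGetD_natCast]
      have h := hWcell m k
      rwa [if_neg (by rintro ⟨h1, -⟩; omega)] at h
    have hcolm : (pvColOf s k)[m]? = some (pvCell s m k) := by
      unfold pvColOf
      rw [List.getElem?_map, List.getElem?_eq_getElem hmlt]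
      simp only [Option.map_some]
      congr 1
      unfold pvCell
      rw [pv_getD_of_lt s m hmlt]
    have htake : (pvColOf s k).take (m + 1) = (pvColOf s k).take m ++ [pvCell s m k] := by
      rw [List.take_add_one, hcolm]; rfl
    rw [htake, List.filter_append]
    by_cases hv : pvCell s m k = 0
    · have hfe : List.filter (fun v => v ≠ 0) [pvCell s m k] = [] := by simp [hv]
      rw [hfe, List.append_nil, ← hnzm]
      unfold pvStepAlt
      rw [hvread, if_neg (by simp [hv])]
    · have hfe : List.filter (fun v => v ≠ 0) [pvCell s m k] = [pvCell s m k] := by simp [hv]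
      rw [hfe, ← hnzm]
      unfold pvStepAlt
      rw [hvread, if_pos (by simpa using hv)]
      simp only [PySem.List.pySetD_natCast, PySem.List.pyGetD_natCast]
      have hinner : (List.range (nzm ++ [pvCell s m k]).length).foldl
          (fun o t => pvWr o t k ((nzm ++ [pvCell s m k]).getD t 0)) s
          = pvWr W nzm.length k (pvCell s m k) := by
        rw [List.length_append, List.length_singleton, List.range_succ, List.foldl_append,
          List.foldl_cons, List.foldl_nil]
        have hfold : (List.range nzm.length).foldl
            (fun o t => pvWr o t k ((nzm ++ [pvCell s m k]).getD t 0)) s = W := by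
          rw [hW]
          apply List.foldl_ext
          intro o t ht
          have ht' : t < nzm.length := List.mem_range.mp ht
          rw [List.getD_eq_getElem?_getD, List.getD_eq_getElem?_getD,
            List.getElem?_append_left ht']
        have hlast : (nzm ++ [pvCell s m k]).getD nzm.length 0 = pvCell s m k := by
          rw [List.getD_eq_getElem?_getD, List.getElem?_concat_length, Option.getD_some]
        rw [hfold, hlast]
      rw [hinner, Prod.mk.injEq]
      exact ⟨rfl, by rw [List.length_append, List.length_singleton]; push_cast; ring⟩

-- B: one column step preserves and extends the invariant
lemma pvBodyAlt_inv (g s : List (List Int)) (k : Nat)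
    (hge : ∀ row ∈ g, g.headI.length ≤ row.length)
    (hk : k < g.headI.length) (hInv : pvInv g s k) :
    pvInv g (pvBodyAlt (g.length : Int) s (k : Int)) (k + 1) := by
  obtain ⟨hlen, hrow, hcell⟩ := hInv
  have hrowK : ∀ i, i < g.length → k < (s.getD i []).length := by
    intro i hi
    rw [hrow i, pv_getD_of_lt g i hi]
    exact lt_of_lt_of_le hk (hge _ (List.getElem_mem hi))
  have hcolmap : pvColOf s k = pvColOf g k :=
    pv_colmap g s k hlen (fun i hi => by
      have := hcell i k hi
      rwa [if_neg (lt_irrefl k)] at this)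
  simp only [pvBodyAlt]
  simp only [pv_range_cast, List.foldl_map]
  have hstep : (fun (st : List (List Int) × Int) (t : Nat) =>
      if PySem.List.pyGetD (PySem.List.pyGetD st.1 ((t : Nat) : Int) ([] : List Int))
          ((k : Nat) : Int) 0 ≠ 0 then
        (PySem.List.pySetD st.1 st.2
          (PySem.List.pySetD (PySem.List.pyGetD st.1 st.2 ([] : List Int)) ((k : Nat) : Int)
            (PySem.List.pyGetD (PySem.List.pyGetD st.1 ((t : Nat) : Int) ([] : List Int))
              ((k : Nat) : Int) 0)),
         st.2 + 1)
      else st) = pvStepAlt k := rfl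
  rw [hstep, ← hlen, pv_compact s k s.length le_rfl]
  have htl : List.take s.length (pvColOf s k) = pvColOf s k :=
    List.take_of_length_le (by simp [pvColOf])
  rw [htl]
  set nz : List Int := (pvColOf s k).filter (fun v => v ≠ 0) with hnz
  have hnzlen : nz.length ≤ s.length := by
    calc nz.length ≤ (pvColOf s k).length := List.length_filter_le _ _
      _ = s.length := by simp [pvColOf]
  obtain ⟨hWlen, hWrow, hWcell⟩ := pv_foldl_wr k (fun t => nz.getD t 0) nz.length s hnzlen
  set W := (List.range nz.length).foldl (fun o t => pvWr o t k (nz.getD t 0)) s with hW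
  -- the tail-zeroing fold over range(w, r)
  have hrange : PySem.List.pyRange ((nz.length : Nat) : Int) ((s.length : Nat) : Int) 1
      = (List.range (s.length - nz.length)).map (fun (t : Nat) => ((nz.length : Int) + (t : Int))) := by
    rw [PySem.List.pyRange_one,
      show (((s.length : Nat) : Int) - ((nz.length : Nat) : Int)).toNat = s.length - nz.length
        by omega]
  simp only [hrange, List.foldl_map]
  have hzfun : (fun (o : List (List Int)) (t : Nat) =>
      PySem.List.pySetD o ((nz.length : Int) + (t : Int))
        (PySem.List.pySetD (PySem.List.pyGetD o ((nz.length : Int) + (t : Int)) ([] : List Int))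
          ((k : Nat) : Int) 0))
      = fun o t => pvWr o (nz.length + t) k ((fun _ => (0 : Int)) (nz.length + t)) := by
    funext o t
    rw [show (nz.length : Int) + (t : Int) = ((nz.length + t : Nat) : Int) by push_cast; ring]
    simp only [PySem.List.pySetD_natCast, PySem.List.pyGetD_natCast]
    rfl
  rw [hzfun]
  obtain ⟨hZlen, hZrow, hZcell⟩ :=
    pv_foldl_wr_off k nz.length (fun _ => (0 : Int)) (s.length - nz.length) W
      (by rw [hWlen]; omega)
  refine ⟨by rw [hZlen, hWlen, hlen], fun i => by rw [hZrow, hWrow, hrow], ?_⟩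
  intro i j hi
  have his : i < s.length := by rwa [hlen]
  rw [hZcell, hWcell]
  have hkW : k < (W.getD i []).length := by rw [hWrow]; exact hrowK i hi
  have hks : k < (s.getD i []).length := hrowK i hi
  by_cases hjk : j = k
  · by_cases hiL : i < nz.length
    · rw [if_neg (by rintro ⟨a, -⟩; omega), if_pos ⟨hiL, hjk, hks⟩,
        if_pos (by omega : j < k + 1), hjk]
      simp only [pvNewcol]
      rw [pv_getD_pad, ← hcolmap, ← hnz, if_pos hiL]
    · rw [if_pos ⟨Nat.le_of_not_lt hiL, by omega, hjk, hkW⟩,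
        if_pos (by omega : j < k + 1), hjk]
      simp only [pvNewcol]
      rw [pv_getD_pad, ← hcolmap, ← hnz, if_neg hiL]
  · rw [if_neg (by rintro ⟨-, -, a, -⟩; exact hjk a),
      if_neg (by rintro ⟨-, a, -⟩; exact hjk a)]
    rw [hcell i j hi]
    by_cases hjk2 : j < k
    · rw [if_pos hjk2, if_pos (by omega)]
    · rw [if_neg hjk2, if_neg (by omega)]

-- the whole column loop establishes the invariant (A)
lemma pv_loop (g : List (List Int))
    (hge : ∀ row ∈ g, g.headI.length ≤ row.length) :
    ∀ m, m ≤ g.headI.length →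
      pvInv g ((PySem.List.pyRange 0 (m : Int) 1).foldl (pvBody (g.length : Int)) g) m := by
  intro m
  induction m with
  | zero =>
    intro _
    rw [show ((0 : Nat) : Int) = 0 from rfl, PySem.List.pyRange_one_eq_nil le_rfl,
      List.foldl_nil]
    exact ⟨rfl, fun i => rfl, fun i j hi => by simp⟩
  | succ m ih =>
    intro hm
    have hcast : ((m + 1 : Nat) : Int) = (m : Int) + 1 := by push_cast; ring
    rw [hcast, PySem.List.pyRange_one_succ_right (by positivity), List.foldl_append,
      List.foldl_cons, List.foldl_nil]
    exact pvBody_inv g _ m hge (by omega) (ih (by omega))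

-- the whole column loop establishes the invariant (B)
lemma pv_loop_alt (g : List (List Int))
    (hge : ∀ row ∈ g, g.headI.length ≤ row.length) :
    ∀ m, m ≤ g.headI.length →
      pvInv g ((PySem.List.pyRange 0 (m : Int) 1).foldl (pvBodyAlt (g.length : Int)) g) m := by
  intro m
  induction m with
  | zero =>
    intro _
    rw [show ((0 : Nat) : Int) = 0 from rfl, PySem.List.pyRange_one_eq_nil le_rfl,
      List.foldl_nil]
    exact ⟨rfl, fun i => rfl, fun i j hi => by simp⟩
  | succ m ih =>
    intro hm
    have hcast : ((m + 1 : Nat) : Int) = (m : Int) + 1 := by push_cast; ring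
    rw [hcast, PySem.List.pyRange_one_succ_right (by positivity), List.foldl_append,
      List.foldl_cons, List.foldl_nil]
    exact pvBodyAlt_inv g _ m hge (by omega) (ih (by omega))

-- ===== VERDICT (by name: the statement is the Claim_ definition above) =====
theorem gravity_up_spec : Claim_equal_gravity_up := by
  intro g _hDom hPre
  unfold Spec_gravity_up
  unfold Pre_gravity_up at hPre
  by_cases hg : g = []
  · subst hg; rfl
  by_cases hc : g.headI = []
  · unfold gravity_up gravity_up_alt
    rw [if_pos (Or.inr hc), if_pos (Or.inr hc)]
  · have hge : ∀ row ∈ g, g.headI.length ≤ row.length := by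
      rcases hPre with h | h | h
      · exact absurd h hg
      · exact absurd h hc
      · exact h
    rw [pv_gravity_eq g hg hc, pv_alt_eq g hg hc]
    exact pv_eq_of_inv g _ _ g.headI.length
      (pv_loop g hge g.headI.length le_rfl)
      (pv_loop_alt g hge g.headI.length le_rfl)
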